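-- pv_equiv track=rewrite | github.com/MrBrantCode/unitest_baseline | mut_generate/mist_train_cf/cf_67668/solution.py | perfect_palindrome
-- ===== SOURCE A (Python) =====
-- def perfect_palindrome(n):
--     result = []
--     for i in range(1, n+1):
--         sum1 = 0
--         temp = i
--         if str(i) == str(i)[::-1]:
--             for j in range(1, i):
--                 if i % j == 0:
--                     sum1 += j
--             if sum1 == i:
--                 result.append(i)
--     return result
-- ===== SOURCE B (Python) =====
-- def perfect_palindrome(n):
--     result = []
--     for i in range(1, n + 1):
--         s = str(i)
--         if s != s[::-1]:
--             continue
--         total = 0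
--         d = 1
--         while d * d <= i:
--             if i % d == 0:
--                 total += d
--                 q = i // d
--                 if q != d:
--                     total += q
--             d += 1
--         if total == 2 * i:
--             result.append(i)
--     return result
-- ===== Notes on version B (the rewrite author's own statement) =====
-- stated objective: faster
-- what changed: The inner proper-divisor sum over all j below i is replaced by a square-root loop that adds each divisor pair (d, i//d) at once and compares the full divisor sum with twice the number.
import Mathlib
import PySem

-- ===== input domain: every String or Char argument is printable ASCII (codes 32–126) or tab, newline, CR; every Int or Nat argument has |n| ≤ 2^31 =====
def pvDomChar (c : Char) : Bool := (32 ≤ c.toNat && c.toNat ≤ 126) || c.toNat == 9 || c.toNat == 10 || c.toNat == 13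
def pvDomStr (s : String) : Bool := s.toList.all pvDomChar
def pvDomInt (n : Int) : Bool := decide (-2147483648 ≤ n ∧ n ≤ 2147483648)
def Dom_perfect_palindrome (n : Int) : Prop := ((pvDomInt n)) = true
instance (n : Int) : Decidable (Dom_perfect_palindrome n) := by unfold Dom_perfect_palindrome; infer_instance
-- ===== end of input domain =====

-- B replaces A's O(i) proper-divisor scan by a sqrt(i) loop adding each divisor pair (d, i//d) at once; return values proved equal.

-- ===== PORT A =====
def perfect_palindrome (n : Int) : List Int :=
  (PySem.List.pyRange 1 (n + 1) 1).foldl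
    (fun result i =>
      let s := PySem.Int.toChars i
      if s == ((PySem.List.slice? s none none (-1)).getD s) then
        let sum1 := (PySem.List.pyRange 1 i 1).foldl
          (fun sum1 j => if PySem.Int.mod i j == 0 then sum1 + j else sum1) 0
        if sum1 == i then result ++ [i] else result
      else result)
    []

-- ===== PORT B =====
-- termination fact for the while loop: d*d ≤ i forces d ≤ i
theorem pvGoB_le {d i : Int} (h : d * d ≤ i) : d ≤ i := by
  rcases le_or_gt d 0 with h0 | h0
  · exact le_trans h0 (le_trans (mul_self_nonneg d) h)
  · calc d = d * 1 := by ring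
      _ ≤ d * d := by exact mul_le_mul_of_nonneg_left h0 (le_of_lt h0)
      _ ≤ i := h

-- while d * d <= i: … ; d += 1
def pvGoB (i d total : Int) : Int :=
  if h : d * d ≤ i then
    pvGoB i (d + 1)
      (if PySem.Int.mod i d == 0 then
        total + d + (if PySem.Int.floordiv i d != d then PySem.Int.floordiv i d else 0)
      else total)
  else total
termination_by (i + 1 - d).toNat
decreasing_by
  have := pvGoB_le h
  omega

def perfect_palindrome_alt (n : Int) : List Int :=
  (PySem.List.pyRange 1 (n + 1) 1).foldl
    (fun result i =>
      let s := PySem.Int.toChars i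
      if s != ((PySem.List.slice? s none none (-1)).getD s) then result
      else if pvGoB i 1 0 == 2 * i then result ++ [i] else result)
    []

-- ===== PRECONDITION & SPEC =====
def Spec_perfect_palindrome (n : Int) (out : List Int) : Prop := out = perfect_palindrome_alt n
instance (n : Int) (out : List Int) : Decidable (Spec_perfect_palindrome n out) := by unfold Spec_perfect_palindrome; infer_instance

-- ===== CLAIM (what is proved, stated in full; the proofs are below) =====
def Claim_equal_perfect_palindrome : Prop := ∀ (n : Int), Dom_perfect_palindrome n → Spec_perfect_palindrome n (perfect_palindrome n)

-- ===== LEMMAS AND PROOFS =====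

-- the contribution one d of B's sqrt loop adds (in Nat)
def pvContrib (m k : Nat) : Nat := if m % k = 0 then k + (if m / k ≠ k then m / k else 0) else 0

theorem pv_sum_list_range (n : Nat) (f : Nat → Int) :
    ((List.range n).map f).sum = ∑ i ∈ Finset.range n, f i := by
  induction n with
  | zero => simp
  | succ k ih => rw [List.range_succ, Finset.sum_range_succ]; simp [ih]

-- A's inner loop computes the proper-divisor sum
theorem pvA_inner (m : Nat) (hm : 1 ≤ m) :
    (PySem.List.pyRange 1 (m : Int) 1).foldl
      (fun sum1 j => if PySem.Int.mod (m : Int) j == 0 then sum1 + j else sum1) 0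
    = ((∑ j ∈ Nat.properDivisors m, j : Nat) : Int) := by
  rw [PySem.List.pyRange_one, List.foldl_map]
  have hstep : (fun (s : Int) (k : Nat) => if PySem.Int.mod (m : Int) (1 + (k : Int)) == 0 then s + (1 + (k : Int)) else s)
      = fun (s : Int) (k : Nat) => s + (if m % (1 + k) = 0 then ((1 + k : Nat) : Int) else 0) := by
    funext s k
    have hc : (1 : Int) + (k : Int) = ((1 + k : Nat) : Int) := by push_cast; ring
    rw [hc, PySem.Int.mod_natCast]
    by_cases h : m % (1 + k) = 0
    · rw [if_pos (show ((↑(m % (1 + k)) : Int) == 0) = true by rw [h]; rfl), if_pos h]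
    · rw [if_neg (show ¬ ((↑(m % (1 + k)) : Int) == 0) = true from
        fun hz => h (by exact_mod_cast (beq_iff_eq.mp hz))), if_neg h]
      ring
  rw [hstep, PySem.List.foldl_add, pv_sum_list_range]
  have hN : (((m : Int) - 1)).toNat = m - 1 := by omega
  rw [hN]
  have h2 : ∑ k ∈ Finset.range (m - 1), (if m % (1 + k) = 0 then ((1 + k : Nat) : Int) else 0)
      = ((∑ k ∈ Finset.range (m - 1), if m % (1 + k) = 0 then (1 + k) else 0 : Nat) : Int) := by
    push_cast [apply_ite (Nat.cast : Nat → Int)]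
    rfl
  rw [h2]
  have h3 : ∑ j ∈ Nat.properDivisors m, j = ∑ k ∈ Finset.range (m - 1), (if m % (1 + k) = 0 then (1 + k) else 0) := by
    have hset : Nat.properDivisors m = (Finset.Ico 1 m).filter (fun k => m % k = 0) := by
      ext k
      simp [Nat.mem_properDivisors, Finset.mem_filter]
      constructor
      · rintro ⟨h1, h2⟩
        exact ⟨⟨Nat.pos_of_dvd_of_pos h1 hm, h2⟩, (Nat.dvd_iff_mod_eq_zero ..).symm.mpr h1⟩
      · rintro ⟨⟨h1, h2⟩, h3⟩
        exact ⟨(Nat.dvd_iff_mod_eq_zero ..).mpr h3, h2⟩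
    rw [hset, Finset.sum_filter, Finset.sum_Ico_eq_sum_range]
  rw [h3]
  ring

theorem pvGoB_eq (m : Nat) (hm : 1 ≤ m) (t : Nat) :
    ∀ d : Nat, 1 ≤ d → m.sqrt + 1 - d ≤ t → ∀ s : Int,
      pvGoB (m : Int) (d : Int) s
      = s + ((∑ k ∈ Finset.Ico d (m.sqrt + 1), pvContrib m k : Nat) : Int) := by
  induction t with
  | zero =>
    intro d hd ht s
    have hgt : Nat.sqrt m < d := by omega
    have hnot : ¬ ((d : Int) * (d : Int) ≤ (m : Int)) := by
      intro hle
      have : d * d ≤ m := by exact_mod_cast hle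
      exact absurd (Nat.le_sqrt.mpr this) (by omega)
    rw [pvGoB, dif_neg hnot]
    rw [Finset.Ico_eq_empty (by omega)]
    simp
  | succ t ih =>
    intro d hd ht s
    by_cases hle : d ≤ Nat.sqrt m
    · have hdd : (d : Int) * (d : Int) ≤ (m : Int) := by
        have : d * d ≤ m := Nat.le_sqrt.mp hle
        exact_mod_cast this
      rw [pvGoB, dif_pos hdd]
      have hcast : ((d : Int) + 1) = ((d + 1 : Nat) : Int) := by push_cast; ring
      rw [hcast, ih (d + 1) (by omega) (by omega)]
      rw [Finset.sum_eq_sum_Ico_succ_bot (by omega : d < Nat.sqrt m + 1)]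
      have harg : (if PySem.Int.mod (m : Int) (d : Int) == 0 then
            s + (d : Int) + (if PySem.Int.floordiv (m : Int) (d : Int) != (d : Int) then PySem.Int.floordiv (m : Int) (d : Int) else 0)
          else s) = s + ((pvContrib m d : Nat) : Int) := by
        rw [PySem.Int.mod_natCast, PySem.Int.floordiv_natCast]
        unfold pvContrib
        by_cases h : m % d = 0
        · rw [if_pos (show ((↑(m % d) : Int) == 0) = true by rw [h]; rfl), if_pos h]
          by_cases h2 : m / d = d
          · rw [if_neg (show ¬ ((↑(m / d) : Int) != (↑d : Int)) = true by rw [h2]; simp), if_neg (by omega)]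
            push_cast; ring
          · rw [if_pos (show ((↑(m / d) : Int) != (↑d : Int)) = true from
              bne_iff_ne.mpr (fun hz => h2 (by exact_mod_cast hz))), if_pos h2]
            push_cast; ring
        · rw [if_neg (show ¬ ((↑(m % d) : Int) == 0) = true from
            fun hz => h (by exact_mod_cast (beq_iff_eq.mp hz))), if_neg h]
          push_cast; ring
      rw [harg]
      push_cast
      ring
    · have hnot : ¬ ((d : Int) * (d : Int) ≤ (m : Int)) := by
        intro hle2
        have : d * d ≤ m := by exact_mod_cast hle2
        exact absurd (Nat.le_sqrt.mpr this) (by omega)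
      rw [pvGoB, dif_neg hnot, Finset.Ico_eq_empty (by omega)]
      simp

theorem pv_sqrt_pairing (m : Nat) (hm : 1 ≤ m) :
    ∑ k ∈ Finset.Ico 1 (m.sqrt + 1), pvContrib m k = ∑ j ∈ Nat.divisors m, j := by
  have hm0 : m ≠ 0 := by omega
  -- small divisors: those ≤ sqrt m
  have hset : (Finset.Ico 1 (m.sqrt + 1)).filter (fun k => m % k = 0)
      = (Nat.divisors m).filter (fun k => k ≤ m.sqrt) := by
    ext k
    simp only [Finset.mem_filter, Finset.mem_Ico, Nat.mem_divisors]
    constructor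
    · rintro ⟨⟨h1, h2⟩, h3⟩
      exact ⟨⟨Nat.dvd_iff_mod_eq_zero.mpr h3, hm0⟩, by omega⟩
    · rintro ⟨⟨h1, _⟩, h2⟩
      exact ⟨⟨Nat.pos_of_dvd_of_pos h1 hm, by omega⟩, Nat.dvd_iff_mod_eq_zero.mp h1⟩
  have step1 : ∑ k ∈ Finset.Ico 1 (m.sqrt + 1), pvContrib m k
      = ∑ k ∈ (Nat.divisors m).filter (fun k => k ≤ m.sqrt), (k + if m / k ≠ k then m / k else 0) := by
    rw [← hset, Finset.sum_filter]
    rfl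
  have step2 : ∑ k ∈ (Nat.divisors m).filter (fun k => k ≤ m.sqrt), (if m / k ≠ k then m / k else 0)
      = ∑ k ∈ ((Nat.divisors m).filter (fun k => k ≤ m.sqrt)).filter (fun k => m / k ≠ k), m / k := by
    exact (Finset.sum_filter _ _).symm
  -- the bijection k ↦ m / k between small divisors with m/k ≠ k and large divisors
  have hbij : ∑ k ∈ ((Nat.divisors m).filter (fun k => k ≤ m.sqrt)).filter (fun k => m / k ≠ k), m / k
      = ∑ k ∈ (Nat.divisors m).filter (fun k => ¬ k ≤ m.sqrt), k := by
    apply Finset.sum_nbij' (fun k => m / k) (fun k => m / k)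
    · intro a ha
      simp only [Finset.mem_filter, Nat.mem_divisors] at ha ⊢
      obtain ⟨⟨⟨hdvd, _⟩, hle⟩, hne⟩ := ha
      have ha1 : 0 < a := Nat.pos_of_dvd_of_pos hdvd hm
      refine ⟨⟨Nat.div_dvd_of_dvd hdvd, hm0⟩, ?_⟩
      intro hq
      -- a ≤ sqrt, m/a ≤ sqrt, a*(m/a)=m, sqrt*sqrt ≤ m : forces a = m/a
      have hmul : a * (m / a) = m := Nat.mul_div_cancel' hdvd
      have hs : Nat.sqrt m * Nat.sqrt m ≤ m := Nat.sqrt_le m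
      have hs1 : 1 ≤ Nat.sqrt m := Nat.le_sqrt'.mpr (by omega)
      have c1 : a * (m / a) ≤ a * Nat.sqrt m := Nat.mul_le_mul_left a hq
      have c2 : a * Nat.sqrt m ≤ Nat.sqrt m * Nat.sqrt m := Nat.mul_le_mul_right _ hle
      have e1 : a * (m / a) = a * Nat.sqrt m := by omega
      have e2 : a * Nat.sqrt m = Nat.sqrt m * Nat.sqrt m := by omega
      have q_eq : m / a = Nat.sqrt m := Nat.eq_of_mul_eq_mul_left ha1 e1
      have a_eq : a = Nat.sqrt m := by
        have := Nat.eq_of_mul_eq_mul_right hs1 (by rw [Nat.mul_comm a (Nat.sqrt m)] at e2; omega : a * Nat.sqrt m = Nat.sqrt m * Nat.sqrt m)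
        omega
      exact hne (by omega)
    · intro a ha
      simp only [Finset.mem_filter, Nat.mem_divisors] at ha ⊢
      obtain ⟨⟨hdvd, _⟩, hgt⟩ := ha
      have ha1 : 0 < a := Nat.pos_of_dvd_of_pos hdvd hm
      have hmul : a * (m / a) = m := Nat.mul_div_cancel' hdvd
      have hq_le : m / a ≤ Nat.sqrt m := by
        by_contra hq
        have h1 : Nat.sqrt m + 1 ≤ a := by omega
        have h2 : Nat.sqrt m + 1 ≤ m / a := by omega
        have : (Nat.sqrt m + 1) * (Nat.sqrt m + 1) ≤ a * (m / a) := Nat.mul_le_mul h1 h2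
        have hlt : m < (Nat.sqrt m + 1) * (Nat.sqrt m + 1) := Nat.lt_succ_sqrt m
        omega
      have hdd : m / (m / a) = a := Nat.div_div_self hdvd hm0
      exact ⟨⟨⟨Nat.div_dvd_of_dvd hdvd, hm0⟩, hq_le⟩, by rw [hdd]; omega⟩
    · intro a ha
      simp only [Finset.mem_filter, Nat.mem_divisors] at ha
      exact Nat.div_div_self ha.1.1.1 hm0
    · intro a ha
      simp only [Finset.mem_filter, Nat.mem_divisors] at ha
      exact Nat.div_div_self ha.1.1 hm0
    · intro a _
      rfl
  calc ∑ k ∈ Finset.Ico 1 (m.sqrt + 1), pvContrib m k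
      = ∑ k ∈ (Nat.divisors m).filter (fun k => k ≤ m.sqrt), (k + if m / k ≠ k then m / k else 0) := step1
    _ = ∑ k ∈ (Nat.divisors m).filter (fun k => k ≤ m.sqrt), k
        + ∑ k ∈ (Nat.divisors m).filter (fun k => ¬ k ≤ m.sqrt), k := by
        rw [Finset.sum_add_distrib, step2, hbij]
    _ = ∑ j ∈ Nat.divisors m, j := Finset.sum_filter_add_sum_filter_not _ _ _

theorem pvGoB_total (m : Nat) (hm : 1 ≤ m) :
    pvGoB (m : Int) 1 0 = ((∑ j ∈ Nat.properDivisors m, j : Nat) : Int) + (m : Int) := by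
  rw [show (1:Int) = ((1:Nat):Int) from rfl,
    pvGoB_eq m hm (m.sqrt + 1) 1 le_rfl (by omega) 0, pv_sqrt_pairing m hm,
    Nat.sum_divisors_eq_sum_properDivisors_add_self]
  push_cast
  ring

-- ===== VERDICT (by name: the statement is the Claim_ definition above) =====
theorem perfect_palindrome_spec : Claim_equal_perfect_palindrome := by
  intro n _
  unfold Spec_perfect_palindrome perfect_palindrome perfect_palindrome_alt
  apply PySem.List.foldl_congr_mem
  intro acc i hi
  have h1 : 1 ≤ i := (PySem.List.mem_pyRange_one.mp hi).1
  have hmi : i = ((i.toNat : Nat) : Int) := by omega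
  set m : Nat := i.toNat with hm
  have hm1 : 1 ≤ m := by omega
  rw [hmi]
  cases hp : (PySem.Int.toChars ((m : Nat) : Int)
      == ((PySem.List.slice? (PySem.Int.toChars ((m : Nat) : Int)) none none (-1)).getD
            (PySem.Int.toChars ((m : Nat) : Int)))) with
  | false => simp [hp, bne]
  | true =>
    simp only [hp, bne, Bool.not_true, Bool.false_eq_true, if_false, if_true]
    rw [pvA_inner m hm1, pvGoB_total m hm1]
    apply if_congr _ rfl rfl
    constructor <;> intro h <;> simp only [beq_iff_eq] at h ⊢ <;> omega
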